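-- pv_equiv track=rewrite | github.com/fleetster22/mod1_python_practice | practice.py | who_is_absent
-- ===== SOURCE A (Python) =====
-- def who_is_absent(students, sent_tokens):
--     cache = {}
--     absent = []
--     for student in students:
--         cache[student] = True
--     for token in sent_tokens:
--         cache[token] = False
--     for kid in cache:
--         if cache.get(kid):
--             absent.append(kid)
--     return absent
-- ===== SOURCE B (Python) =====
-- def who_is_absent(students, sent_tokens):
--     tokens = set(sent_tokens)
--     seen = set()
--     absent = []
--     for s in students:
--         if s not in tokens and s not in seen:
--             seen.add(s)
--             absent.append(s)
--     return absent
-- ===== Notes on version B (the rewrite author's own statement) =====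
-- stated objective: simpler
-- what changed: Replaces A's mark-all-then-sweep dict (three loops: flag students True, overwrite tokens False, then scan the combined dict's keys) with a single in-order pass over the students list that filters against a token set and deduplicates with a seen set.
import Mathlib
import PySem

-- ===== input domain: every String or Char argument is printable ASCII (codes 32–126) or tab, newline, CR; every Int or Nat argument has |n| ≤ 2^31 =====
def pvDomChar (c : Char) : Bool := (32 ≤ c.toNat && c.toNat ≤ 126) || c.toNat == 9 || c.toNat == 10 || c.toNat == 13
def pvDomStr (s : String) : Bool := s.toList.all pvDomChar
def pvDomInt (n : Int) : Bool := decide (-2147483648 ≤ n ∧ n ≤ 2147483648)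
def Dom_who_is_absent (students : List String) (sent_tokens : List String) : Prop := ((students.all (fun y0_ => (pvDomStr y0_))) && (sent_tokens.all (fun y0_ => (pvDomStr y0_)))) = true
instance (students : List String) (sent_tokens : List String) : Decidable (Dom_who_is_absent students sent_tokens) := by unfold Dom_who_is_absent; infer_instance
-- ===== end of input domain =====

-- B replaces A's mark-then-sweep dict (three loops over a combined dict) with one
-- filtered, deduplicating pass over the students list; same result, similar cost.


-- ===== PORT A =====
def who_is_absent (students : List String) (sent_tokens : List String) : List String :=
  let cache : PySem.Dict String Bool :=
    students.foldl (fun d student => d.insert student true) PySem.Dict.empty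
  let cache := sent_tokens.foldl (fun d token => d.insert token false) cache
  -- 'if cache.get(kid):' — get() returns None/True/False; only True is truthy, i.e. getD kid false
  cache.keys.foldl (fun absent kid => if cache.getD kid false then absent ++ [kid] else absent) []

-- ===== PORT B =====
def who_is_absent_alt (students : List String) (sent_tokens : List String) : List String :=
  let tokens : PySem.Set String := PySem.Set.ofList sent_tokens
  (students.foldl
    (fun (p : PySem.Set String × List String) s =>
      if PySem.Set.contains tokens s = false ∧ PySem.Set.contains p.1 s = false
      then (PySem.Set.add p.1 s, p.2 ++ [s]) else p)
    (PySem.Set.empty, [])).2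

-- ===== PRECONDITION & SPEC =====
def Spec_who_is_absent (students : List String) (sent_tokens : List String) (out : List String) : Prop := out = who_is_absent_alt students sent_tokens
instance (students : List String) (sent_tokens : List String) (out : List String) : Decidable (Spec_who_is_absent students sent_tokens out) := by unfold Spec_who_is_absent; infer_instance

-- ===== CLAIM (what is proved, stated in full; the proofs are below) =====
def Claim_equal_who_is_absent : Prop := ∀ (students : List String) (sent_tokens : List String), Dom_who_is_absent students sent_tokens → Spec_who_is_absent students sent_tokens (who_is_absent students sent_tokens)

-- ===== LEMMAS AND PROOFS =====

-- value of a key after the 'mark every token False' loop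
theorem getD_foldl_insert_false (l : List String) (d : PySem.Dict String Bool) (k : String) :
    (l.foldl (fun d t => d.insert t false) d).getD k false
      = if k ∈ l then false else d.getD k false := by
  induction l generalizing d with
  | nil => simp
  | cons t ts ih =>
      simp only [List.foldl_cons, ih, PySem.Dict.getD_insert, List.mem_cons]
      by_cases h1 : k ∈ ts <;> by_cases h2 : k = t <;> simp [h1, h2]

-- value of a key after the 'mark every student True' loop
theorem getD_foldl_insert_true (l : List String) (d : PySem.Dict String Bool) (k : String) :
    (l.foldl (fun d s => d.insert s true) d).getD k false
      = if k ∈ l then true else d.getD k false := by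
  induction l generalizing d with
  | nil => simp
  | cons s ss ih =>
      simp only [List.foldl_cons, ih, PySem.Dict.getD_insert, List.mem_cons]
      by_cases h1 : k ∈ ss <;> by_cases h2 : k = s <;> simp [h1, h2]

-- filter commutes with Set-building (first-occurrence dedup)
theorem filter_foldl_add (p : String → Bool) (l : List String) (S : PySem.Set String) :
    (l.foldl PySem.Set.add S).filter p = (l.filter p).foldl PySem.Set.add (S.filter p) := by
  induction l generalizing S with
  | nil => simp
  | cons x xs ih =>
      simp only [List.foldl_cons, List.filter_cons]
      by_cases hp : p x
      · rw [if_pos hp]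
        have hmem : x ∈ S.filter p ↔ x ∈ S := by simp [List.mem_filter, hp]
        by_cases hx : x ∈ S
        · rw [PySem.Set.add_of_mem hx, ih, List.foldl_cons,
              PySem.Set.add_of_mem (hmem.mpr hx)]
        · rw [PySem.Set.add_of_not_mem hx, ih, List.foldl_cons,
              PySem.Set.add_of_not_mem (fun h => hx (hmem.mp h))]
          simp [List.filter_append, hp]
      · rw [if_neg hp]
        by_cases hx : x ∈ S
        · rw [PySem.Set.add_of_mem hx, ih]
        · rw [PySem.Set.add_of_not_mem hx, ih]
          simp [List.filter_append, hp]

theorem ofList_filter (p : String → Bool) (l : List String) :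
    (PySem.Set.ofList l).filter p = PySem.Set.ofList (l.filter p) := by
  rw [PySem.Set.ofList_eq_foldl, filter_foldl_add, PySem.Set.ofList_eq_foldl]
  rfl

-- B's loop: the accumulator mirrors exactly the elements the seen-set gains,
-- and the seen-set evolves as Set.add over the token-free students.
theorem alt_loop (tokens : PySem.Set String) (l : List String)
    (S : PySem.Set String) (A : List String) :
    ∃ t, (l.filter (fun s => !(PySem.Set.contains tokens s))).foldl PySem.Set.add S = S ++ t ∧
      l.foldl
        (fun (p : PySem.Set String × List String) s =>
          if PySem.Set.contains tokens s = false ∧ PySem.Set.contains p.1 s = false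
          then (PySem.Set.add p.1 s, p.2 ++ [s]) else p) (S, A)
        = (S ++ t, A ++ t) := by
  induction l generalizing S A with
  | nil => exact ⟨[], by simp⟩
  | cons x xs ih =>
      simp only [List.filter_cons, List.foldl_cons]
      cases htok : PySem.Set.contains tokens x with
      | false =>
          rw [if_pos (by simp), List.foldl_cons]
          cases hc : PySem.Set.contains S x with
          | true =>
              have hS : x ∈ S := (PySem.Set.contains_iff S x).mp hc
              rw [if_neg (by simp), PySem.Set.add_of_mem hS]
              exact ih S A
          | false =>
              have hS : x ∉ S := fun h => by
                rw [(PySem.Set.contains_iff S x).mpr h] at hc; cases hc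
              rw [if_pos ⟨rfl, rfl⟩, PySem.Set.add_of_not_mem hS]
              obtain ⟨t, h1, h2⟩ := ih (S ++ [x]) (A ++ [x])
              refine ⟨x :: t, ?_, ?_⟩
              · simpa using h1
              · simpa using h2
      | true =>
          rw [if_neg (by simp), if_neg (by simp)]
          exact ih S A

theorem alt_eq (students sent_tokens : List String) :
    who_is_absent_alt students sent_tokens
      = PySem.Set.ofList
          (students.filter (fun s => !(PySem.Set.contains (PySem.Set.ofList sent_tokens) s))) := by
  unfold who_is_absent_alt
  obtain ⟨t, h1, h2⟩ :=
    alt_loop (PySem.Set.ofList sent_tokens) students PySem.Set.empty []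
  simp only [h2]
  rw [PySem.Set.ofList_eq_foldl]
  simpa [PySem.Set.empty] using h1.symm

-- ===== VERDICT (by name: the statement is the Claim_ definition above) =====
theorem who_is_absent_spec : Claim_equal_who_is_absent := by
  intro students sent_tokens _
  unfold Spec_who_is_absent who_is_absent
  rw [alt_eq]
  have hkeys :
      ((sent_tokens.foldl (fun d t => d.insert t false)
          (students.foldl (fun d s => d.insert s true) (PySem.Dict.empty : PySem.Dict String Bool)))).keys
        = PySem.Set.update (PySem.Set.ofList students) sent_tokens := by
    rw [PySem.Dict.keys_foldl_insert, PySem.Dict.keys_foldl_insert]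
    simp [PySem.Dict.keys_empty, PySem.Set.update_nil_left]
  have hval : ∀ k, (sent_tokens.foldl (fun d t => d.insert t false)
          (students.foldl (fun d s => d.insert s true) (PySem.Dict.empty : PySem.Dict String Bool))).getD k false
      = if k ∈ sent_tokens then false else if k ∈ students then true else false := by
    intro k
    rw [getD_foldl_insert_false, getD_foldl_insert_true]
    simp
  rw [PySem.List.foldl_append_if_eq_filter, hkeys, PySem.Set.update_eq_append_filter,
      List.filter_append, List.nil_append]
  have hextra :
      (((PySem.Set.ofList sent_tokens).filter
          (fun y => !(PySem.Set.contains (PySem.Set.ofList students) y))).filter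
        (fun kid => (sent_tokens.foldl (fun d t => d.insert t false)
          (students.foldl (fun d s => d.insert s true) (PySem.Dict.empty : PySem.Dict String Bool))).getD kid false)) = [] := by
    rw [List.filter_eq_nil_iff]
    intro k hk
    have hk' : k ∈ sent_tokens :=
      (PySem.Set.mem_ofList sent_tokens k).mp (List.mem_filter.mp hk).1
    simp [hval k, hk']
  rw [hextra, List.append_nil, ofList_filter]
  refine congrArg PySem.Set.ofList (List.filter_congr ?_)
  intro k hk
  rw [hval k]
  by_cases ht : k ∈ sent_tokens
  · simp [ht, PySem.Set.mem_ofList]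
  · simp [ht, hk, PySem.Set.mem_ofList]
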